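/- GENERATED by mk_final_copies.py from the proof of the farm's unit `start_decoder.C15` (farm:start_decoder.C15.2: Lemmas.lean) as the
   re-elaboration sweep compiled it — do not edit. -/
import Vorbis.Spec.Units.start_decoder_C15

open X86 X86.User Asan Vorbis Vorbis.Spec Vorbis.Spec.StartDecoder

set_option maxRecDepth 4000
set_option maxHeartbeats 4000000

namespace Vorbis.Spec.start_decoder_C15

/-- A word whose value is known is the `addr` of that value, read from right to left (the slots of the frame are spelled
`g.e.reg .rsp - k` by the walker and `addr (g.R + k)` by the assertions). -/
theorem addr_of_toNat (w : Word) (a : Nat) (h : w.toNat = a) : addr a = w :=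
  (eq_addr w a h).symm

/-- **Where `*f` is**: `*f` (the stack object `p` of stb_vorbis_open_memory, an object of the CALLERS' frames or of `A.2`) lies
above start_decoder's return-address slot, or off the stack region: no store into start_decoder's own frame hits it. -/
theorem f_where {u₀ : State} {g : Ghost} {pc : Word} {A : Arena × List Obj} {v : State} (hf : Frame u₀ g pc A v)
    (hh : g.Hand A) : g.RA + 8 ≤ g.f ∨ g.f + 1808 ≤ 0x700000 ∨ 0x800000 ≤ g.f := by
  obtain ⟨o, ho, h1, h2⟩ := hh.obj
  simp only [voff] at h2
  rcases List.mem_append.mp ho with hs | hoth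
  · left
    unfold stackObjs at hs
    obtain ⟨bF, hbF, hob⟩ := List.mem_flatMap.mp hs
    obtain ⟨fo, _, rfl⟩ := FrameLayout.mem_objsAt hob
    have := hf.callers bF hbF
    simp only at h1
    omega
  · right
    have := hf.shadow.off o hoth
    unfold OffStack at this
    omega

/-- **A block outside the arena's buffer stays live when an object inside the buffer is released.** -/
theorem live_drop {objs others : List Obj} {dead : Obj} {B : Block} {lo hi : Nat}
    (hl : B.live (Live (objs ++ others))) (hdead : lo ≤ dead.base ∧ dead.base + dead.size ≤ hi)
    (hB : B.base + B.size ≤ lo ∨ hi ≤ B.base) : B.live (Live (objs ++ dropObjs [dead] others)) := by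
  rw [Block.live_iff] at hl ⊢
  intro x hx
  obtain ⟨o, ho, hb⟩ := hl x hx
  refine ⟨o, ?_, hb⟩
  rcases List.mem_append.mp ho with h1 | h2
  · exact List.mem_append_left _ h1
  · apply List.mem_append_right
    rw [mem_dropObjs]
    refine ⟨h2, ?_⟩
    intro hd
    have e : o = dead := List.mem_singleton.mp hd
    subst e
    unfold Obj.Bytes at hb
    unfold Block.mem at hx
    omega

/-- **One live object around a range outside the arena's buffer is still there when an object inside the buffer is released.** -/
theorem liveIn_drop {others : List Obj} {frames : List (Nat × FrameLayout)} {dead : Obj} {a n lo hi : Nat}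
    (hl : LiveIn others frames a n) (hn : 0 < n) (hdead : lo ≤ dead.base ∧ dead.base + dead.size ≤ hi)
    (ha : a + n ≤ lo ∨ hi ≤ a) : LiveIn (dropObjs [dead] others) frames a n := by
  obtain ⟨o, ho, h1, h2⟩ := hl
  refine ⟨o, ?_, h1, h2⟩
  rcases List.mem_append.mp ho with hs | hoth
  · exact List.mem_append_left _ hs
  · apply List.mem_append_right
    rw [mem_dropObjs]
    refine ⟨hoth, ?_⟩
    intro hd
    have e : o = dead := List.mem_singleton.mp hd
    subst e
    omega

/-- **The hand-over carrier after the release of a temp block**: `*f`, the input, the output lie outside the arena's buffer, the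
globals below it; the released object lies inside. -/
theorem hand_drop {g : Ghost} {A : Arena × List Obj} (hh : g.Hand A) (T' : Nat) (dead : Obj)
    (hdead : A.1.B ≤ dead.base ∧ dead.base + dead.size ≤ A.1.B + A.1.L) (hkind : dead.kind = .temp) :
    g.Hand (A.1.withTemp T' [], dropObjs [dead] A.2) := by
  have hout := hh.outside
  have hobj := hh.objOut
  simp only [voff] at hobj
  refine ⟨⟨?_, ?_, ?_, ?_, hh.arenaText, hh.outside⟩, hh.objOut⟩
  · exact liveIn_drop hh.obj (by simp only [voff]; omega) hdead (by simp only [voff]; omega)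
  · intro hl
    have := hout (inBlock g.len) List.mem_cons_self
    exact liveIn_drop (hh.inp hl) hl hdead (by simp only [vblock, inBlock] at this; omega)
  · have := hout blockOUT (List.mem_cons_of_mem _ List.mem_cons_self)
    exact liveIn_drop hh.out (by simp only [blockOUT]; omega) hdead (by simp only [blockOUT] at this ⊢; omega)
  · intro o ho
    rw [mem_dropObjs]
    refine ⟨hh.globals o ho, ?_⟩
    intro hd
    have e : o = dead := List.mem_singleton.mp hd
    subst e
    have hb : o.kind = .global := by
      simp only [Vorbis.Globals.objs, Vorbis.Globals.descs, List.map_cons, List.map_nil, List.reverse_cons,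
        List.reverse_nil, List.nil_append, List.cons_append, List.mem_cons, List.mem_nil_iff, or_false] at ho
      rcases ho with rfl | rfl | rfl | rfl | rfl | rfl <;> rfl
    rw [hb] at hkind
    exact absurd hkind (by decide)

/-- **THE EXIT OF THE SEGMENT, ON THE INVARIANT SIDE** (0x114788, `AtC10 i`): from the entry assertion `InC15` at `v` and a state `w`
whose memory differs from `v`'s only in 56 bytes of stack below the steady rsp (two return addresses, setup_temp_free's frame), in
`temp_offset` (`[f + 132, f + 136)`) and in the shadow of the released block, with the arena layer and the shadow layer of
setup_temp_free's post (the ghost arena `A.1.withTemp T' []`, the temp object `dead` dropped from the live list): `BodyC10`.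
Every clause is carried by its frame lemma (`ObjSame`, `AllKept A.1.Blk`, the own frame above rsp unchanged); the live set
shrinks (`live_drop`, `hand_drop`); `Cur.toSD4` closes the iteration. -/
theorem exit_body {u₀ : State} {g : Ghost} {i : Nat} {A2 A3 Ai : Arena} {A : Arena × List Obj} {mults : Nat} {v w : State}
    (h : InC15 u₀ g i A2 A3 Ai A mults v) (T' n : Nat) (dead : Obj)
    (hdead : A.1.B ≤ dead.base ∧ dead.base + dead.size ≤ A.1.B + A.1.L) (hkind : dead.kind = .temp)
    (hm : A.1.B ≤ mults ∧ mults + n ≤ A.1.B + A.1.L)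
    (hrip : w.rip = pc_C10) (hrsp : w.reg .rsp = addr g.R) (hinv : abiInv w) (hcode : CodeOK u₀ w.mem)
    (hsame : Mem.SameExcept [⟨g.R - 56, g.R⟩, ⟨g.f + 132, g.f + 136⟩, shadowSpan mults (mults + n)] v.mem w.mem)
    (harena : ArenaOK (A.1.withTemp T' []) (dropObjs [dead] A.2) w.mem g.f)
    (hshadow : ShadowInv (dropObjs [dead] A.2) g.frames' g.R w.mem) (hr14 : w.reg .r14 = v.reg .r14) :
    BodyC10 u₀ g i (A.1.withTemp T' [], dropObjs [dead] A.2) w := by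
  have hfr := h.frame
  have hcur := h.cur
  have hsd := hcur.sd
  -- numbers
  have hfw := f_where hfr hcur.hand
  have hfi := OB1.inside (Bits.ob1 hsd.bits) hsd.env.ok
  obtain ⟨hRA, hR8⟩ := hfr.r_eq
  obtain ⟨_, hroom, htop⟩ := hfr.ra
  simp only [depth, steady] at hRA hroom
  have hbnd := hsd.arena.bounds
  have hobjOut := hcur.hand.objOut
  simp only [voff] at hobjOut
  -- the three windows, classified
  have hsp : ∀ s, s ∈ [(⟨g.R - 56, g.R⟩ : Span), ⟨g.f + 132, g.f + 136⟩, shadowSpan mults (mults + n)] →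
      (0x700000 ≤ s.lo ∧ s.hi ≤ g.R) ∨ 0xC00000 ≤ s.lo ∨ (g.f + 132 ≤ s.lo ∧ s.hi ≤ g.f + 136) := by
    intro s hs
    simp only [List.mem_cons, List.mem_nil_iff, or_false] at hs
    rcases hs with rfl | rfl | rfl
    · left
      simp only
      omega
    · right
      right
      simp only
      omega
    · right
      left
      unfold shadowSpan
      simp only
      omega
  -- `*f` but for `temp_offset`
  have hobj : ObjSame g.f v.mem w.mem := by
    apply ObjSame.of_sameExcept hsame (by simp only [voff]; omega)
    intro s hs
    have := hsp s hs
    omega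
  -- every setup block
  have hkept : AllKept A.1.Blk v.mem w.mem := by
    intro B hB
    have hin := arena_inside hsd.arena hB
    have hoff := hsd.arena.blk_off_stack hB
    apply Block.Kept.of_sameExcept hsame
    · intro s hs
      have := hsp s hs
      omega
    · omega
  -- the own frame above rsp
  have hstack : Mem.EqOn g.R (g.RA + 8) v.mem w.mem := by
    apply hsame.eqOn
    intro s hs
    have := hsp s hs
    omega
  have hRA' : g.RA = g.R + 1480 := by omega
  -- the new frame
  have hframe : Frame u₀ g pc_C10 (A.1.withTemp T' [], dropObjs [dead] A.2) w := by
    refine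
      { entry := hfr.entry
        rip := hrip
        rsp := hrsp
        shadowIdx := ?_
        saved_rbx := ?_
        saved_rbp := ?_
        saved_r12 := ?_
        saved_r13 := ?_
        saved_r14 := ?_
        saved_r15 := ?_
        saved_ra := ?_
        code := hcode
        inv := hinv
        shadow := hshadow
        offText := fun o ho => hfr.offText o (mem_dropObjs.mp ho).1
        ext := hfr.ext.trans (A.1.extends_withTemp T' [])
        callers := hfr.callers
        sh7 := ?_
        same := ?_ }
    · rw [hstack.u64 _ (by omega) (by omega) (by omega)]
      exact hfr.shadowIdx
    · rw [hstack.u64 _ (by omega) (by omega) (by omega)]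
      exact hfr.saved_rbx
    · rw [hstack.u64 _ (by omega) (by omega) (by omega)]
      exact hfr.saved_rbp
    · rw [hstack.u64 _ (by omega) (by omega) (by omega)]
      exact hfr.saved_r12
    · rw [hstack.u64 _ (by omega) (by omega) (by omega)]
      exact hfr.saved_r13
    · rw [hstack.u64 _ (by omega) (by omega) (by omega)]
      exact hfr.saved_r14
    · rw [hstack.u64 _ (by omega) (by omega) (by omega)]
      exact hfr.saved_r15
    · rw [hstack.u64 _ (by omega) (by omega) (by omega)]
      exact hfr.saved_ra
    · -- SH7: the table `log2_4` is a fixed object, apart from `*f`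
      intro j hj
      have hap := hsd.env.ok.apart (objBlock g.f) ⟨0x120640, 16⟩ (Bits.OB1 hsd.bits)
        (runBlk_extra (by simp only [fixedBlocks, globalBlocks, List.mem_cons, true_or, or_true]))
      have hdis : g.f + 1808 ≤ 0x120640 ∨ 0x120650 ≤ g.f := by
        rcases hap with e | hd
        · have := congrArg Block.size e
          simp only [vblock, voff] at this
          omega
        · simp only [vblock, voff] at hd
          omega
      have e : (UInt64.ofNat (Vorbis.Globals.log2_4.beg + j)).toNat = 0x120640 + j := by
        have : Vorbis.Globals.log2_4.beg = 0x120640 := rfl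
        rw [this]
        exact toNat_addr _ (by omega)
      rw [hsame.readLE _ 1 (by omega) ?_]
      · exact hfr.sh7 j hj
      · intro s hs
        have := hsp s hs
        omega
    · -- the function's footprint
      apply Mem.SameExcept.step_same hfr.same hsame
      intro s hs a ha1 ha2
      have eB := hfr.ext.B
      have eL := hfr.ext.L
      simp only [List.mem_cons, List.mem_nil_iff, or_false] at hs
      rcases hs with rfl | rfl | rfl
      · refine ⟨⟨g.RA - depth, g.RA⟩, List.mem_cons_self, ?_, ?_⟩
        · simp only [depth] at ha1 ⊢
          omega
        · simp only at ha2 ⊢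
          omega
      · refine ⟨(objBlock (g.e.reg .rdi).toNat).span, List.mem_cons_of_mem _ List.mem_cons_self, ?_, ?_⟩
        · show g.f ≤ a
          simp only at ha1
          omega
        · show a < g.f + 1808
          simp only at ha2
          omega
      · refine ⟨shadowSpan g.A0.1.B (g.A0.1.B + g.A0.1.L), ?_, ?_, ?_⟩
        · simp only [footprint, writes, List.mem_cons, true_or, or_true]
        · unfold shadowSpan at ha1 ⊢
          simp only at ha1 ⊢
          omega
        · unfold shadowSpan at ha2 ⊢
          simp only at ha2 ⊢
          omega
  -- the fields of `*f` the record reads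
  have ecnt : stb_vorbis.codebook_count w.mem g.f = stb_vorbis.codebook_count v.mem g.f := by
    simp only [vacc, voff]
    exact hobj.i32 160 (by decide)
  have ecbs : stb_vorbis.codebooks w.mem g.f = stb_vorbis.codebooks v.mem g.f := by
    simp only [vacc, voff]
    exact hobj.u64 168 (by decide)
  have ecb : g.cb w.mem i = g.cb v.mem i := by
    unfold Ghost.cb stb_vorbis.codebooks_at
    rw [ecbs]
  have hcbok := hcur.ages.cbOK
  have hcbA : A.1.Blk (codebooksBlock v.mem g.f) := hcbok.F2.mono hcur.ages.exti
  have hcbK := hkept _ hcbA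
  have hcbin := arena_inside hsd.arena hcbA
  -- the weaker form of the invariant for the new arena
  have hsd' : SDw g.len 3 (A.1.withTemp T' [], dropObjs [dead] A.2) (g.Blk (A.1.withTemp T' [], dropObjs [dead] A.2))
      (g.Live (A.1.withTemp T' [], dropObjs [dead] A.2)) w.mem g.f g.R := by
    refine
      { env := ⟨hshadow.shadow.covers, hsd.env.ok, ?_⟩
        frame := hsd.frame.frame (hstack.mono (by omega) (by omega)) (by omega)
        arena := harena
        setups := fun B hB => runBlk_setup hB
        bits := hsd.bits.frame hobj
        first := ?_
        discard0 := ?_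
        header := fun hk => (hsd.header hk).frame hobj
        cb0 := fun hk => ⟨(hsd.cb0 hk).1.frame hobj, by rw [ecbs]; exact (hsd.cb0 hk).2⟩
        rest := ?_ }
    · -- every allocated block is live
      intro B hB
      rcases hB with hs | hx
      · exact harena.blkLive (fun o ho => List.mem_append_right _ ho) B hs
      · apply live_drop (hsd.env.live B (Or.inr hx)) hdead
        rcases List.mem_cons.mp hx with rfl | hfix
        · simp only [vblock, voff]
          omega
        · exact hcur.hand.outside B hfix
    · have e : stb_vorbis.first_decode w.mem g.f = stb_vorbis.first_decode v.mem g.f := by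
        simp only [vacc, voff]
        exact hobj.u8 1749 (by decide)
      rw [e]
      exact hsd.first
    · have e : stb_vorbis.discard_samples_deferred w.mem g.f = stb_vorbis.discard_samples_deferred v.mem g.f := by
        simp only [vacc, voff]
        exact hobj.i32 1784 (by decide)
      rw [e]
      exact hsd.discard0
    · have hr := hsd.rest
      have e3 : restFrom 3 = 176 := by decide
      unfold RestZero at hr ⊢
      rw [e3] at hr ⊢
      simp only [voff] at hr ⊢
      apply hr.frame
      · apply hsame.eqOn
        intro s hs
        have := hsp s hs
        omega
      · omega
  have hext := A.1.extends_withTemp T' []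
  -- CUR(i) for the new arena
  have hcur' : Cur g i A2 A3 Ai (A.1.withTemp T' [], dropObjs [dead] A.2) w := by
    refine
      { sd := hsd'
        hand := hand_drop hcur.hand T' dead hdead hkind
        ages := ?_
        zf := ?_
        lt := ?_
        slot_f := ?_
        slot_i := ?_
        r14 := ?_ }
    · apply BookTrans.grow _ hext
      apply hcur.ages.frame_old (hobj.sub (by decide))
      intro B hB
      exact hkept B (hB.mono hcur.ages.exti)
    · rw [ecbs, ecnt]
      have hlt := hcur.lt
      have hF1 := hcbok.F1
      apply hcur.zf.same
      · apply Mem.EqOn.mono hcbK.same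
        · simp only [vblock, voff]
          omega
        · simp only [vblock, voff]
          exact Nat.le_refl _
      · omega
      · simp only [vblock, voff] at hcbin ⊢
        omega
    · rw [ecnt]
      exact hcur.lt
    · rw [hstack.u64 _ (by omega) (by omega) (by omega)]
      exact hcur.slot_f
    · rw [hstack.u32 _ (by omega) (by omega) (by omega)]
      exact hcur.slot_i
    · rw [hr14, ecb]
      exact hcur.r14
  -- the finished book
  have hok' : CodebookOK (Since Ai (A.1.withTemp T' [])) w.mem (g.cb w.mem i) := by
    rw [ecb]
    have hk : CodebookOK (Since Ai A.1) w.mem (g.cb v.mem i) := by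
      apply h.ok.frame
      · exact hcbok.cb_kept hcbK i hcur.lt
      · intro hse
        exact hkept _ (h.ok.K4.sv hse).1
    exact hk.reblk (fun B _ hB => hB.mono hext)
  obtain ⟨hsd4, hages⟩ := hcur'.toSD4 rfl hok'
  exact ⟨hframe, hcur'.hand, hcur'.slot_f, hcur'.slot_i, hsd4, A2, A3, hages⟩

end Vorbis.Spec.start_decoder_C15
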